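-- pv_equiv track=rewrite | github.com/AvgBlue/leetcode | test/q3.py | solution
-- ===== SOURCE A (Python) =====
-- def solution(plan):
--     R = len(plan)
--     C = len(plan[0])
--     WALL = "#"
--     EMPTY = "."
--     DIRTY = "*"
--
--     visited = [[False for _ in range(C)] for _ in range(R)]
--     robot_runs = 0
--
--     def dfs(r, c):
--         visited[r][c] = True
--         if plan[r][c] == DIRTY:
--             dirty_found[0] = True
--
--         for dr, dc in [(0, 1), (1, 0), (0, -1), (-1, 0)]:
--             nr, nc = r + dr, c + dc
--             if (
--                 0 <= nr < R
--                 and 0 <= nc < C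
--                 and not visited[nr][nc]
--                 and plan[nr][nc] != WALL
--             ):
--                 dfs(nr, nc)
--
--     dirty_found = [False]
--     for r in range(R):
--         for c in range(C):
--             if (plan[r][c] == EMPTY or plan[r][c] == DIRTY) and not visited[r][c]:
--                 dirty_found = [False]
--                 dfs(r, c)
--                 if dirty_found[0]:
--                     robot_runs += 1
--
--     return robot_runs
-- ===== SOURCE B (Python) =====
-- def solution(plan):
--     R = len(plan)
--     C = len(plan[0])
--     n = R * C
--
--     def is_open(i):
--         return plan[i // C][i % C] != "#"
--
--     def relax(i, label):
--         # smallest label among cell i and its open 4-neighbours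
--         v = label[i]
--         if is_open(i):
--             r, c = divmod(i, C)
--             cand = []
--             if r > 0:
--                 cand.append(i - C)
--             if r + 1 < R:
--                 cand.append(i + C)
--             if c > 0:
--                 cand.append(i - 1)
--             if c + 1 < C:
--                 cand.append(i + 1)
--             for j in cand:
--                 if is_open(j) and label[j] < v:
--                     v = label[j]
--         return v
--
--     # minimum-label propagation (in-place, alternating forward/backward sweeps)
--     # to a fixed point; a cell's label is then the smallest index in its region
--     label = list(range(n))
--     changed = True
--     while changed:
--         changed = False
--         for i in range(n):
--             v = relax(i, label)
--             if v != label[i]: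
--                 label[i] = v
--                 changed = True
--         for i in reversed(range(n)):
--             v = relax(i, label)
--             if v != label[i]:
--                 label[i] = v
--                 changed = True
--
--     return len({label[i] for i in range(n) if plan[i // C][i % C] == "*"})
-- ===== Notes on version B (the rewrite author's own statement) =====
-- stated objective: alternative
-- what changed: Replaced A's recursive DFS flood-fill with visited matrix by in-place minimum-label propagation over flat cell indices: alternating forward/backward sweeps let every open cell adopt the smallest label among itself and its open 4-neighbours until a fixed point, and the answer is the number of distinct labels over dirty cells.
import Mathlib
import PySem

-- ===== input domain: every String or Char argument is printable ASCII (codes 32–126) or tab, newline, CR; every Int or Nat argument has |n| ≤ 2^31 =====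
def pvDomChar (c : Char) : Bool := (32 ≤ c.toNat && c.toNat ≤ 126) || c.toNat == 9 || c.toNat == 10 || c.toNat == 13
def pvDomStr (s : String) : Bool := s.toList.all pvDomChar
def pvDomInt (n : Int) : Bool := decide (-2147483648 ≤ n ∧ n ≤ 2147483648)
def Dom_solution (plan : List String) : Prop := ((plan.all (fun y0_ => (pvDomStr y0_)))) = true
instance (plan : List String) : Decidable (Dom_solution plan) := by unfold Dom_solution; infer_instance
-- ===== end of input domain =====

-- B replaces A's recursive DFS flood-fill by iterative minimum-label propagation to a
-- fixed point (distinct labels of dirty cells); equal return value proved on Pre_.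

-- ===== PORT A =====
-- plan[r][c]; default '#' is never hit on inputs admitted by Pre_ (all accesses are in range there)
def chA (plan : List String) (r c : Nat) : Char := ((plan.getD r "").toList).getD c '#'
-- visited[r][c] lookup / visited[r][c] = True on the 2-D boolean list
def vget (vis : List (List Bool)) (r c : Nat) : Bool := (vis.getD r []).getD c false
def vset (vis : List (List Bool)) (r c : Nat) : List (List Bool) := vis.set r ((vis.getD r []).set c true)

-- the recursive dfs; fuel only makes the recursion structural, it never runs out inside Pre_
mutual
def dfsA (plan : List String) (R C : Nat) : Nat → List (List Bool) → Bool → Int → Int → List (List Bool) × Bool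
  | 0, vis, d, _, _ => (vis, d)
  | fuel+1, vis, d, r, c =>
    let vis1 := vset vis r.toNat c.toNat
    let d1 := d || (chA plan r.toNat c.toNat == '*')
    dfsGo plan R C fuel [(0,1),(1,0),(0,-1),(-1,0)] (vis1, d1) r c
  termination_by fuel _ _ _ _ => (fuel, 0)
def dfsGo (plan : List String) (R C : Nat) (fuel : Nat) : List (Int × Int) → List (List Bool) × Bool → Int → Int → List (List Bool) × Bool
  | [], st, _, _ => st
  | dd :: rest, st, r, c =>
    let nr := r + dd.1
    let nc := c + dd.2
    let st' := if 0 ≤ nr ∧ nr < (R : Int) ∧ 0 ≤ nc ∧ nc < (C : Int) ∧ vget st.1 nr.toNat nc.toNat = false ∧ chA plan nr.toNat nc.toNat ≠ '#'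
      then dfsA plan R C fuel st.1 st.2 nr nc else st
    dfsGo plan R C fuel rest st' r c
  termination_by dirs _ _ _ => (fuel, dirs.length + 1)
end

def solution (plan : List String) : Int :=
  let R := plan.length
  let C := (plan.getD 0 "").toList.length
  let vis0 := List.replicate R (List.replicate C false)
  ((List.range R).foldl (fun st r =>
    (List.range C).foldl (fun (st : List (List Bool) × Int) c =>
      if (chA plan r c == '.' || chA plan r c == '*') && vget st.1 r c == false then
        let res := dfsA plan R C (R * C + 1) st.1 false (r : Int) (c : Int)
        (res.1, if res.2 then st.2 + 1 else st.2)
      else st) st) (vis0, (0 : Int))).2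

-- ===== PORT B =====
def openB (plan : List String) (C : Nat) (i : Nat) : Bool := chA plan (i / C) (i % C) != '#'

def candB (R C : Nat) (i : Nat) : List Nat :=
  let r := i / C
  let c := i % C
  (if 0 < r then [i - C] else []) ++ (if r + 1 < R then [i + C] else []) ++
  (if 0 < c then [i - 1] else []) ++ (if c + 1 < C then [i + 1] else [])

def newLabelB (plan : List String) (R C : Nat) (label : List Nat) (i : Nat) : Nat :=
  if openB plan C i then
    (candB R C i).foldl (fun v j => if openB plan C j && decide (label.getD j 0 < v) then label.getD j 0 else v) (label.getD i 0)
  else label.getD i 0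

def sweepB (plan : List String) (R C : Nat) (order : List Nat) (st : List Nat × Bool) : List Nat × Bool :=
  order.foldl (fun (st : List Nat × Bool) i =>
    let v := newLabelB plan R C st.1 i
    if v ≠ st.1.getD i 0 then (st.1.set i v, true) else st) st

def iterB (plan : List String) (R C n : Nat) : Nat → List Nat → List Nat
  | 0, l => l
  | f+1, l =>
    let p := sweepB plan R C (List.range n) (l, false)
    let p2 := sweepB plan R C (List.range n).reverse p
    if p2.2 then iterB plan R C n f p2.1 else p2.1

def solution_alt (plan : List String) : Int :=
  let R := plan.length
  let C := (plan.getD 0 "").toList.length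
  let n := R * C
  let label := iterB plan R C n (n * n + 1) (List.range n)
  (((List.range n).foldl (fun (s : PySem.Set Nat) i =>
      if chA plan (i / C) (i % C) == '*' then PySem.Set.add s (label.getD i 0) else s)
    PySem.Set.empty).length : Int)

-- ===== PRECONDITION & SPEC =====
-- Pre_ excludes exactly the inputs where A raises IndexError: the empty list (plan[0])
-- and plans where some row is shorter than the first row (plan[r][c] with c < C).
def Pre_solution (plan : List String) : Prop :=
  plan ≠ [] ∧ ∀ s ∈ plan, (plan.getD 0 "").toList.length ≤ s.toList.length
instance (plan : List String) : Decidable (Pre_solution plan) := by unfold Pre_solution; infer_instance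
def pvWitness_solution : List String := ["*.#", ".#*"]
def Spec_solution (plan : List String) (out : Int) : Prop := out = solution_alt plan
instance (plan : List String) (out : Int) : Decidable (Spec_solution plan out) := by unfold Spec_solution; infer_instance

-- ===== CLAIM (what is proved, stated in full; the proofs are below) =====
def Claim_equal_solution : Prop := ∀ (plan : List String), Dom_solution plan → Pre_solution plan → Spec_solution plan (solution plan)

-- ===== LEMMAS AND PROOFS =====

-- abbreviations for the grid of the fixed plan
def Rp (plan : List String) : Nat := plan.length
def Cp (plan : List String) : Nat := (plan.getD 0 "").toList.length
def Np (plan : List String) : Nat := Rp plan * Cp plan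
def gridF (plan : List String) : Finset (Nat × Nat) := Finset.range (Rp plan) ×ˢ Finset.range (Cp plan)
def OpenP (plan : List String) (p : Nat × Nat) : Prop := p.1 < Rp plan ∧ p.2 < Cp plan ∧ chA plan p.1 p.2 ≠ '#'
def EligP (plan : List String) (p : Nat × Nat) : Prop := p.1 < Rp plan ∧ p.2 < Cp plan ∧ (chA plan p.1 p.2 = '.' ∨ chA plan p.1 p.2 = '*')
def AdjP (plan : List String) (p q : Nat × Nat) : Prop :=
  OpenP plan p ∧ OpenP plan q ∧
  ((p.1 = q.1 ∧ (p.2 + 1 = q.2 ∨ q.2 + 1 = p.2)) ∨ (p.2 = q.2 ∧ (p.1 + 1 = q.1 ∨ q.1 + 1 = p.1)))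
def ReachP (plan : List String) (p q : Nat × Nat) : Prop := Relation.ReflTransGen (AdjP plan) p q
def idxP (plan : List String) (p : Nat × Nat) : Nat := p.1 * Cp plan + p.2
def cellP (plan : List String) (i : Nat) : Nat × Nat := (i / Cp plan, i % Cp plan)
noncomputable def cmin (plan : List String) (p : Nat × Nat) : Nat :=
  sInf {m | ∃ q, ReachP plan p q ∧ idxP plan q = m}

lemma adjP_symm {plan : List String} {p q : Nat × Nat} (h : AdjP plan p q) : AdjP plan q p := by
  obtain ⟨hp, hq, hrel⟩ := h
  exact ⟨hq, hp, by tauto⟩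

lemma reachP_symm {plan : List String} {p q : Nat × Nat} (h : ReachP plan p q) : ReachP plan q p := by
  induction h with
  | refl => exact Relation.ReflTransGen.refl
  | tail _ hadj ih => exact Relation.ReflTransGen.trans (Relation.ReflTransGen.single (adjP_symm hadj)) ih

lemma reachP_open {plan : List String} {p q : Nat × Nat} (hp : OpenP plan p) (h : ReachP plan p q) : OpenP plan q := by
  induction h with
  | refl => exact hp
  | tail _ hadj _ => exact hadj.2.1

lemma idxP_lt {plan : List String} {p : Nat × Nat} (h1 : p.1 < Rp plan) (h2 : p.2 < Cp plan) :
    idxP plan p < Np plan := by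
  unfold idxP Np
  calc p.1 * Cp plan + p.2 < p.1 * Cp plan + Cp plan := by omega
  _ ≤ Rp plan * Cp plan := by
      have := Nat.succ_le_of_lt h1
      calc p.1 * Cp plan + Cp plan = (p.1 + 1) * Cp plan := by ring
      _ ≤ Rp plan * Cp plan := Nat.mul_le_mul_right _ this

lemma idxP_inj {plan : List String} {p q : Nat × Nat} (hp : p.2 < Cp plan) (hq : q.2 < Cp plan)
    (h : idxP plan p = idxP plan q) : p = q := by
  unfold idxP at h
  have h1 : p.1 = q.1 := by
    rcases Nat.lt_trichotomy p.1 q.1 with hlt | heq | hgt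
    · exfalso; have : p.1 + 1 ≤ q.1 := hlt
      have := Nat.mul_le_mul_right (Cp plan) this; nlinarith
    · exact heq
    · exfalso; have : q.1 + 1 ≤ p.1 := hgt
      have := Nat.mul_le_mul_right (Cp plan) this; nlinarith
  have : p.2 = q.2 := by rw [h1] at h; omega
  exact Prod.ext h1 this

lemma cellP_idxP {plan : List String} {p : Nat × Nat} (h : p.2 < Cp plan) : cellP plan (idxP plan p) = p := by
  unfold cellP idxP
  have h0 : 0 < Cp plan := by omega
  rw [Nat.add_comm (p.1 * Cp plan) p.2]
  ext
  · show (p.2 + p.1 * Cp plan) / Cp plan = p.1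
    rw [Nat.add_mul_div_right _ _ h0, Nat.div_eq_of_lt h]; omega
  · show (p.2 + p.1 * Cp plan) % Cp plan = p.2
    rw [Nat.add_mul_mod_self_right, Nat.mod_eq_of_lt h]

lemma idxP_cellP {plan : List String} {i : Nat} (h : i < Np plan) : idxP plan (cellP plan i) = i := by
  unfold idxP cellP
  show i / Cp plan * Cp plan + i % Cp plan = i
  rw [Nat.mul_comm]
  exact Nat.div_add_mod i (Cp plan)

lemma cellP_lt {plan : List String} {i : Nat} (h : i < Np plan) :
    (cellP plan i).1 < Rp plan ∧ (cellP plan i).2 < Cp plan := by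
  unfold cellP Np at *
  have h0 : 0 < Cp plan := by
    rcases Nat.eq_zero_or_pos (Cp plan) with h' | h'
    · exfalso; rw [h'] at h; omega
    · exact h'
  constructor
  · exact Nat.div_lt_of_lt_mul (by rw [Nat.mul_comm]; exact h)
  · exact Nat.mod_lt _ h0

-- cmin basics
lemma cmin_nonempty {plan : List String} (p : Nat × Nat) :
    {m | ∃ q, ReachP plan p q ∧ idxP plan q = m}.Nonempty :=
  ⟨idxP plan p, p, Relation.ReflTransGen.refl, rfl⟩

lemma cmin_mem {plan : List String} (p : Nat × Nat) :
    ∃ q, ReachP plan p q ∧ idxP plan q = cmin plan p :=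
  Nat.sInf_mem (cmin_nonempty p)

lemma cmin_le {plan : List String} {p q : Nat × Nat} (h : ReachP plan p q) :
    cmin plan p ≤ idxP plan q := Nat.sInf_le ⟨q, h, rfl⟩

lemma cmin_eq_of_reach {plan : List String} {p q : Nat × Nat} (h : ReachP plan p q) :
    cmin plan p = cmin plan q := by
  apply le_antisymm
  · obtain ⟨w, hw, hidx⟩ := cmin_mem (plan := plan) q
    calc cmin plan p ≤ idxP plan w := cmin_le (Relation.ReflTransGen.trans h hw)
    _ = cmin plan q := hidx
  · obtain ⟨w, hw, hidx⟩ := cmin_mem (plan := plan) p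
    calc cmin plan q ≤ idxP plan w := cmin_le (Relation.ReflTransGen.trans (reachP_symm h) hw)
    _ = cmin plan p := hidx

lemma cmin_inj {plan : List String} {p q : Nat × Nat} (hp : OpenP plan p) (hq : OpenP plan q)
    (h : cmin plan p = cmin plan q) : ReachP plan p q := by
  obtain ⟨w, hw, hidx⟩ := cmin_mem (plan := plan) p
  obtain ⟨w', hw', hidx'⟩ := cmin_mem (plan := plan) q
  have hww' : w = w' := by
    apply idxP_inj (reachP_open hp hw).2.1 (reachP_open hq hw').2.1
    rw [hidx, hidx', h]
  exact Relation.ReflTransGen.trans hw (by rw [hww']; exact reachP_symm hw')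

-- the common answer both programs compute
noncomputable def answerVal (plan : List String) : Nat :=
  (((gridF plan).filter (fun q => chA plan q.1 q.2 = '*')).image (cmin plan)).card


lemma mem_gridF {plan : List String} {q : Nat × Nat} :
    q ∈ gridF plan ↔ q.1 < Rp plan ∧ q.2 < Cp plan := by
  unfold gridF
  simp [Finset.mem_product]

-- ===== B-side proof =====
def NbrG (p q : Nat × Nat) : Prop :=
  (p.1 = q.1 ∧ (p.2 + 1 = q.2 ∨ q.2 + 1 = p.2)) ∨ (p.2 = q.2 ∧ (p.1 + 1 = q.1 ∨ q.1 + 1 = p.1))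

lemma cp_pos {plan : List String} {i : Nat} (h : i < Np plan) : 0 < Cp plan := by
  unfold Np at h
  rcases Nat.eq_zero_or_pos (Cp plan) with h' | h'
  · rw [h'] at h; omega
  · exact h'

lemma openB_iff {plan : List String} {i : Nat} (h : i < Np plan) :
    openB plan (Cp plan) i = true ↔ OpenP plan (cellP plan i) := by
  have hb := cellP_lt h
  unfold openB OpenP cellP at *
  constructor
  · intro hx
    refine ⟨hb.1, hb.2, ?_⟩
    simpa [bne_iff_ne] using hx
  · intro hx
    simpa [bne_iff_ne] using hx.2.2

def foldMin (P : Nat → Bool) (f : Nat → Nat) (xs : List Nat) (v0 : Nat) : Nat :=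
  xs.foldl (fun v j => if P j && decide (f j < v) then f j else v) v0

lemma foldMin_spec (P : Nat → Bool) (f : Nat → Nat) :
    ∀ (xs : List Nat) (v0 : Nat),
      foldMin P f xs v0 ≤ v0 ∧
      (∀ j ∈ xs, P j = true → foldMin P f xs v0 ≤ f j) ∧
      (foldMin P f xs v0 = v0 ∨ ∃ j ∈ xs, P j = true ∧ foldMin P f xs v0 = f j) := by
  intro xs
  induction xs with
  | nil => intro v0; simp [foldMin]
  | cons j rest ih =>
    intro v0
    have hstep : foldMin P f (j :: rest) v0
        = foldMin P f rest (if P j && decide (f j < v0) then f j else v0) := rfl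
    set v1 := if P j && decide (f j < v0) then f j else v0 with hv1
    obtain ⟨h1, h2, h3⟩ := ih v1
    have hle : v1 ≤ v0 := by
      rw [hv1]
      split_ifs with hc
      · obtain ⟨hP, hlt⟩ : P j = true ∧ f j < v0 := by simpa using hc
        omega
      · exact le_rfl
    refine ⟨?_, ?_, ?_⟩
    · rw [hstep]; exact le_trans h1 hle
    · intro j' hj' hPj'
      rcases List.mem_cons.mp hj' with heq | hmem
      · subst heq
        rw [hstep]
        by_cases hlt : f j' < v0
        · have hv : v1 = f j' := by rw [hv1]; simp [hPj', hlt]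
          exact le_of_le_of_eq h1 hv
        · have hv : v1 = v0 := by rw [hv1]; simp [hlt]
          have : foldMin P f rest v1 ≤ v0 := le_of_le_of_eq h1 hv
          omega
      · rw [hstep]; exact h2 j' hmem hPj'
    · rw [hstep]
      rcases h3 with h3 | ⟨j', hj', hPj', hj'eq⟩
      · by_cases hc : (P j && decide (f j < v0)) = true
        · obtain ⟨hP, _⟩ : P j = true ∧ f j < v0 := by simpa using hc
          right
          refine ⟨j, List.mem_cons_self, hP, ?_⟩
          rw [h3, hv1, if_pos hc]
        · left
          rw [h3, hv1, if_neg hc]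
      · right; exact ⟨j', List.mem_cons_of_mem _ hj', hPj', hj'eq⟩

lemma newLabelB_closed {plan : List String} {R C : Nat} {l : List Nat} {i : Nat}
    (h : openB plan C i = false) : newLabelB plan R C l i = l.getD i 0 := by
  unfold newLabelB; rw [h]; simp

lemma newLabelB_open {plan : List String} {R C : Nat} {l : List Nat} {i : Nat}
    (h : openB plan C i = true) :
    newLabelB plan R C l i = foldMin (openB plan C) (fun j => l.getD j 0) (candB R C i) (l.getD i 0) := by
  unfold newLabelB foldMin; rw [h]; simp

lemma mem_candB_spec {plan : List String} {i j : Nat} (hi : i < Np plan)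
    (hj : j ∈ candB (Rp plan) (Cp plan) i) :
    j < Np plan ∧ NbrG (cellP plan i) (cellP plan j) := by
  have h0 : 0 < Cp plan := cp_pos hi
  have hc : i % Cp plan < Cp plan := Nat.mod_lt _ h0
  have hr : i / Cp plan < Rp plan := (cellP_lt hi).1
  have hrc : i / Cp plan * Cp plan + i % Cp plan = i := idxP_cellP hi
  simp only [candB, List.mem_append, List.mem_ite_nil_right, List.mem_singleton] at hj
  rcases hj with ((⟨hcond, hj⟩ | ⟨hcond, hj⟩) | ⟨hcond, hj⟩) | ⟨hcond, hj⟩ <;> subst hj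
  · -- up: j = i - C, cell (i/C - 1, i % C)
    have hj_eq : i - Cp plan = idxP plan (i / Cp plan - 1, i % Cp plan) := by
      unfold idxP
      dsimp only
      have : (i / Cp plan - 1) * Cp plan = i / Cp plan * Cp plan - Cp plan := Nat.sub_one_mul _ _
      have hle : Cp plan ≤ i / Cp plan * Cp plan := le_trans (by omega) (Nat.mul_le_mul_right _ hcond)
      omega
    have hlt : idxP plan (i / Cp plan - 1, i % Cp plan) < Np plan := idxP_lt (by simp; omega) (by simpa using hc)
    rw [hj_eq]
    refine ⟨hlt, ?_⟩
    rw [cellP_idxP (by simpa using hc)]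
    right
    refine ⟨by simp [cellP], ?_⟩
    right; simp [cellP]; omega
  · -- down: j = i + C
    have hj_eq : i + Cp plan = idxP plan (i / Cp plan + 1, i % Cp plan) := by
      unfold idxP
      dsimp only
      have : (i / Cp plan + 1) * Cp plan = i / Cp plan * Cp plan + Cp plan := Nat.succ_mul _ _
      omega
    have hlt : idxP plan (i / Cp plan + 1, i % Cp plan) < Np plan := idxP_lt (by simpa using hcond) (by simpa using hc)
    rw [hj_eq]
    refine ⟨hlt, ?_⟩
    rw [cellP_idxP (by simpa using hc)]
    right
    refine ⟨by simp [cellP], ?_⟩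
    left; simp [cellP]
  · -- left: j = i - 1
    have hj_eq : i - 1 = idxP plan (i / Cp plan, i % Cp plan - 1) := by
      unfold idxP; dsimp only; omega
    have hlt : idxP plan (i / Cp plan, i % Cp plan - 1) < Np plan := idxP_lt (by simpa using hr) (by simp; omega)
    rw [hj_eq]
    refine ⟨hlt, ?_⟩
    rw [cellP_idxP (by simp; omega)]
    left
    refine ⟨by simp [cellP], ?_⟩
    right; simp [cellP]; omega
  · -- right: j = i + 1
    have hj_eq : i + 1 = idxP plan (i / Cp plan, i % Cp plan + 1) := by
      unfold idxP; dsimp only; omega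
    have hlt : idxP plan (i / Cp plan, i % Cp plan + 1) < Np plan := idxP_lt (by simpa using hr) (by simpa using hcond)
    rw [hj_eq]
    refine ⟨hlt, ?_⟩
    rw [cellP_idxP (by simpa using hcond)]
    left
    refine ⟨by simp [cellP], ?_⟩
    left; simp [cellP]

lemma candB_of_nbr {plan : List String} {i : Nat} {q : Nat × Nat} (hi : i < Np plan)
    (hq1 : q.1 < Rp plan) (hq2 : q.2 < Cp plan) (hn : NbrG (cellP plan i) q) :
    idxP plan q ∈ candB (Rp plan) (Cp plan) i := by
  have h0 : 0 < Cp plan := cp_pos hi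
  have hc : i % Cp plan < Cp plan := Nat.mod_lt _ h0
  have hr : i / Cp plan < Rp plan := (cellP_lt hi).1
  have hrc := idxP_cellP hi
  unfold idxP cellP at hrc
  dsimp only at hrc
  simp only [candB, List.mem_append, List.mem_ite_nil_right, List.mem_singleton]
  unfold cellP at hn
  unfold idxP
  rcases hn with ⟨h1, h2 | h2⟩ | ⟨h1, h2 | h2⟩
  · -- same row, right neighbour
    right
    simp at h1 h2
    constructor
    · omega
    · rw [← h1]; omega
  · -- same row, left neighbour
    left; right
    simp at h1 h2
    constructor
    · omega
    · rw [← h1]; omega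
  · -- same column, down neighbour
    left; left; right
    simp at h1 h2
    constructor
    · omega
    · rw [← h1, ← h2]
      have : (i / Cp plan + 1) * Cp plan = i / Cp plan * Cp plan + Cp plan := Nat.succ_mul _ _
      omega
  · -- same column, up neighbour
    left; left; left
    simp at h1 h2
    constructor
    · omega
    · rw [← h1]
      have hs : (q.1 + 1) * Cp plan = q.1 * Cp plan + Cp plan := Nat.succ_mul _ _
      have h3 : (q.1 + 1) * Cp plan = i / Cp plan * Cp plan := by rw [h2]
      omega

lemma adjP_of_cand {plan : List String} {i j : Nat} (hi : i < Np plan)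
    (hj : j ∈ candB (Rp plan) (Cp plan) i)
    (hoi : openB plan (Cp plan) i = true) (hoj : openB plan (Cp plan) j = true) :
    AdjP plan (cellP plan i) (cellP plan j) := by
  obtain ⟨hjn, hnbr⟩ := mem_candB_spec hi hj
  exact ⟨(openB_iff hi).mp hoi, (openB_iff hjn).mp hoj, hnbr⟩

-- sums and single-cell updates
lemma sum_eq_range (l : List Nat) :
    l.sum = ∑ i ∈ Finset.range l.length, l.getD i 0 := by
  have hl : l = (List.range l.length).map (fun i => l.getD i 0) := by
    apply List.ext_getElem (by simp)
    intro i h1 h2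
    simp only [List.getElem_map, List.getElem_range]
    exact (List.getD_eq_getElem l 0 h1).symm
  conv_lhs => rw [hl]
  rw [← List.sum_toFinset _ (List.nodup_range), List.toFinset_range]

lemma getD_set_nat (l : List Nat) {i : Nat} (j v : Nat) (hi : i < l.length) :
    (l.set i v).getD j 0 = if i = j then v else l.getD j 0 := by
  rw [List.getD_eq_getElem?_getD, List.getD_eq_getElem?_getD, List.getElem?_set]
  by_cases h : i = j
  · subst h; simp [hi]
  · simp [h]

lemma sum_set_lt {l : List Nat} {i v : Nat} (hi : i < l.length) (hv : v < l.getD i 0) :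
    (l.set i v).sum < l.sum := by
  rw [sum_eq_range, sum_eq_range, List.length_set]
  apply Finset.sum_lt_sum
  · intro j _
    rw [getD_set_nat _ _ _ hi]
    split_ifs with h
    · subst h; omega
    · exact le_rfl
  · refine ⟨i, Finset.mem_range.mpr hi, ?_⟩
    rw [getD_set_nat _ _ _ hi, if_pos rfl]
    exact hv

lemma sum_le_pointwise {l1 l2 : List Nat} (hlen : l1.length = l2.length)
    (h : ∀ j, l1.getD j 0 ≤ l2.getD j 0) : l1.sum ≤ l2.sum := by
  rw [sum_eq_range, sum_eq_range, hlen]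
  exact Finset.sum_le_sum (fun j _ => h j)

def GoodB (plan : List String) (l : List Nat) : Prop :=
  l.length = Np plan ∧ ∀ i, i < Np plan →
    (l.getD i 0 ≤ i ∧
     (openB plan (Cp plan) i = true →
        ∃ q, ReachP plan (cellP plan i) q ∧ idxP plan q = l.getD i 0))

def FixB (plan : List String) (l : List Nat) : Prop :=
  ∀ i, i < Np plan → newLabelB plan (Rp plan) (Cp plan) l i = l.getD i 0

lemma goodB_init (plan : List String) : GoodB plan (List.range (Np plan)) := by
  refine ⟨by simp, ?_⟩
  intro i hi
  have hg : (List.range (Np plan)).getD i 0 = i := by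
    rw [List.getD_eq_getElem _ _ (by simpa using hi)]; simp
  refine ⟨by omega, ?_⟩
  intro _
  exact ⟨cellP plan i, Relation.ReflTransGen.refl, by rw [idxP_cellP hi, hg]⟩

lemma newLabelB_le {plan : List String} {l : List Nat} {i : Nat} :
    newLabelB plan (Rp plan) (Cp plan) l i ≤ l.getD i 0 := by
  by_cases h : openB plan (Cp plan) i = true
  · rw [newLabelB_open h]
    exact (foldMin_spec _ _ _ _).1
  · rw [newLabelB_closed (by simpa using h)]

lemma newLabelB_witness {plan : List String} {l : List Nat} {i : Nat} (hg : GoodB plan l)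
    (hi : i < Np plan) (hopen : openB plan (Cp plan) i = true) :
    ∃ q, ReachP plan (cellP plan i) q ∧ idxP plan q = newLabelB plan (Rp plan) (Cp plan) l i := by
  obtain ⟨hlen, hprop⟩ := hg
  rw [newLabelB_open hopen]
  rcases (foldMin_spec (openB plan (Cp plan)) (fun j => l.getD j 0) (candB (Rp plan) (Cp plan) i) (l.getD i 0)).2.2 with
    heq | ⟨j, hjmem, hPj, heq⟩
  · rw [heq]; exact (hprop i hi).2 hopen
  · rw [heq]
    obtain ⟨hjn, _⟩ := mem_candB_spec hi hjmem
    obtain ⟨q, hq, hidx⟩ := (hprop j hjn).2 hPj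
    exact ⟨q, Relation.ReflTransGen.head (adjP_of_cand hi hjmem hopen hPj) hq, hidx⟩

lemma good_relax {plan : List String} {l : List Nat} {i : Nat} (hg : GoodB plan l)
    (hi : i < Np plan) :
    GoodB plan (l.set i (newLabelB plan (Rp plan) (Cp plan) l i)) := by
  have hlen : i < l.length := by rw [hg.1]; exact hi
  refine ⟨by rw [List.length_set]; exact hg.1, ?_⟩
  intro j hj
  rw [getD_set_nat _ _ _ hlen]
  by_cases h : i = j
  · subst h
    rw [if_pos rfl]
    exact ⟨le_trans newLabelB_le (hg.2 i hi).1, fun hopen => newLabelB_witness hg hi hopen⟩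
  · rw [if_neg h]
    exact hg.2 j hj

lemma sweepB_spec {plan : List String} :
    ∀ (order : List Nat) (l : List Nat) (ch : Bool), (∀ i ∈ order, i < Np plan) → GoodB plan l →
      GoodB plan (sweepB plan (Rp plan) (Cp plan) order (l, ch)).1 ∧
      (∀ j, (sweepB plan (Rp plan) (Cp plan) order (l, ch)).1.getD j 0 ≤ l.getD j 0) ∧
      (ch = true → (sweepB plan (Rp plan) (Cp plan) order (l, ch)).2 = true) ∧
      ((sweepB plan (Rp plan) (Cp plan) order (l, ch)).2 = false →
        (sweepB plan (Rp plan) (Cp plan) order (l, ch)).1 = l ∧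
        ∀ i ∈ order, newLabelB plan (Rp plan) (Cp plan) l i = l.getD i 0) ∧
      ((sweepB plan (Rp plan) (Cp plan) order (l, ch)).2 = true →
        ch = true ∨ (sweepB plan (Rp plan) (Cp plan) order (l, ch)).1.sum < l.sum) := by
  intro order
  induction order with
  | nil =>
    intro l ch _ hg
    refine ⟨hg, fun j => le_rfl, fun h => h, fun h => ⟨rfl, by simp⟩, fun h => Or.inl h⟩
  | cons i rest ih =>
    intro l ch hmem hg
    have hi : i < Np plan := hmem i List.mem_cons_self
    have hrest : ∀ j ∈ rest, j < Np plan := fun j hj => hmem j (List.mem_cons_of_mem _ hj)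
    have hstep : sweepB plan (Rp plan) (Cp plan) (i :: rest) (l, ch)
        = sweepB plan (Rp plan) (Cp plan) rest
            (if newLabelB plan (Rp plan) (Cp plan) l i ≠ l.getD i 0
             then (l.set i (newLabelB plan (Rp plan) (Cp plan) l i), true) else (l, ch)) := rfl
    by_cases hv : newLabelB plan (Rp plan) (Cp plan) l i = l.getD i 0
    · rw [hstep, if_neg (by simpa using hv)]
      obtain ⟨C1, C2, C3m, C3, C4⟩ := ih l ch hrest hg
      refine ⟨C1, C2, C3m, ?_, C4⟩
      intro h
      obtain ⟨h1, h2⟩ := C3 h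
      refine ⟨h1, ?_⟩
      intro j hj
      rcases List.mem_cons.mp hj with rfl | hj'
      · exact hv
      · exact h2 j hj'
    · rw [hstep, if_pos (by simpa using hv)]
      have hilen : i < l.length := by rw [hg.1]; exact hi
      have hlt : newLabelB plan (Rp plan) (Cp plan) l i < l.getD i 0 :=
        lt_of_le_of_ne newLabelB_le hv
      have hg' : GoodB plan (l.set i (newLabelB plan (Rp plan) (Cp plan) l i)) :=
        good_relax hg hi
      obtain ⟨C1, C2, C3m, C3, C4⟩ := ih (l.set i (newLabelB plan (Rp plan) (Cp plan) l i)) true hrest hg'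
      have hpt : ∀ j, (l.set i (newLabelB plan (Rp plan) (Cp plan) l i)).getD j 0 ≤ l.getD j 0 := by
        intro j
        rw [getD_set_nat _ _ _ hilen]
        split_ifs with h
        · subst h; omega
        · exact le_rfl
      refine ⟨C1, ?_, fun _ => C3m rfl, ?_, ?_⟩
      · intro j
        exact le_trans (C2 j) (hpt j)
      · intro h
        rw [C3m rfl] at h
        exact absurd h (by simp)
      · intro _
        right
        have hsum1 : (sweepB plan (Rp plan) (Cp plan) rest
            (l.set i (newLabelB plan (Rp plan) (Cp plan) l i), true)).1.sum
            ≤ (l.set i (newLabelB plan (Rp plan) (Cp plan) l i)).sum := by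
          apply sum_le_pointwise
          · rw [C1.1, hg'.1]
          · exact C2
        have hsum2 : (l.set i (newLabelB plan (Rp plan) (Cp plan) l i)).sum < l.sum :=
          sum_set_lt hilen hlt
        omega

lemma iterB_good {plan : List String} :
    ∀ (fuel : Nat) (l : List Nat), GoodB plan l → l.sum < fuel →
      GoodB plan (iterB plan (Rp plan) (Cp plan) (Np plan) fuel l) ∧
      FixB plan (iterB plan (Rp plan) (Cp plan) (Np plan) fuel l) := by
  intro fuel
  induction fuel with
  | zero => intro l _ h; omega
  | succ f ih =>
    intro l hg hsum
    have hmemr : ∀ i ∈ List.range (Np plan), i < Np plan := by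
      intro i hi; simpa using hi
    have hmemrr : ∀ i ∈ (List.range (Np plan)).reverse, i < Np plan := by
      intro i hi; rw [List.mem_reverse] at hi; simpa using hi
    obtain ⟨S1g, S1pt, S1m, S1fix, S1sum⟩ := sweepB_spec (plan := plan) (List.range (Np plan)) l false hmemr hg
    set p := sweepB plan (Rp plan) (Cp plan) (List.range (Np plan)) (l, false) with hp
    obtain ⟨S2g, S2pt, S2m, S2fix, S2sum⟩ := sweepB_spec (plan := plan) (List.range (Np plan)).reverse p.1 p.2 hmemrr S1g
    set p2 := sweepB plan (Rp plan) (Cp plan) (List.range (Np plan)).reverse (p.1, p.2) with hp2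
    have hiter : iterB plan (Rp plan) (Cp plan) (Np plan) (f + 1) l
        = if p2.2 then iterB plan (Rp plan) (Cp plan) (Np plan) f p2.1 else p2.1 := rfl
    rw [hiter]
    by_cases hch : p2.2 = true
    · rw [if_pos hch]
      have hsumle : p.1.sum ≤ l.sum := sum_le_pointwise (by rw [S1g.1, hg.1]) S1pt
      have hsum2le : p2.1.sum ≤ p.1.sum := sum_le_pointwise (by rw [S2g.1, S1g.1]) S2pt
      have hdec : p2.1.sum < l.sum := by
        rcases S2sum hch with hpt | hlt
        · rcases S1sum hpt with h | h
          · exact absurd h (by simp)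
          · omega
        · omega
      exact ih p2.1 S2g (by omega)
    · rw [if_neg hch]
      simp only [Bool.not_eq_true] at hch
      obtain ⟨h21, _⟩ := S2fix hch
      have hpf : p.2 = false := by
        by_contra hpt
        simp only [Bool.not_eq_false] at hpt
        rw [S2m hpt] at hch
        exact Bool.true_eq_false.mp hch
      obtain ⟨h11, h1fix⟩ := S1fix hpf
      rw [h21, h11]
      refine ⟨hg, ?_⟩
      intro j hj
      exact h1fix j (by simpa using hj)

lemma fix_label_le_reach {plan : List String} {l : List Nat} (hg : GoodB plan l) (hf : FixB plan l)
    {i : Nat} (hi : i < Np plan) {q : Nat × Nat} (hreach : ReachP plan (cellP plan i) q) :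
    l.getD i 0 ≤ idxP plan q := by
  suffices h : ∀ p q, ReachP plan p q → ∀ j, j < Np plan → cellP plan j = p → l.getD j 0 ≤ l.getD (idxP plan q) 0 ∧ (OpenP plan q ∨ q = p) by
    obtain ⟨hq, hcase⟩ := h _ _ hreach i hi rfl
    rcases hcase with hopen | rfl
    · have hqn : idxP plan q < Np plan := idxP_lt hopen.1 hopen.2.1
      exact le_trans hq (hg.2 _ hqn).1
    · rw [idxP_cellP hi] at hq ⊢
      exact le_trans hq ((hg.2 i hi).1)
  intro p q hreach
  induction hreach with
  | refl =>
    intro j hj hcell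
    rw [← hcell, idxP_cellP hj]
    exact ⟨le_rfl, Or.inr rfl⟩
  | @tail b c hab hbc ih =>
    intro j hj hcell
    obtain ⟨hle, _⟩ := ih j hj hcell
    have hbopen : OpenP plan b := hbc.1
    have hcopen : OpenP plan c := hbc.2.1
    have hbn : idxP plan b < Np plan := idxP_lt hbopen.1 hbopen.2.1
    have hcn : idxP plan c < Np plan := idxP_lt hcopen.1 hcopen.2.1
    have hcellb : cellP plan (idxP plan b) = b := cellP_idxP hbopen.2.1
    have hob : openB plan (Cp plan) (idxP plan b) = true := (openB_iff hbn).mpr (by rwa [hcellb])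
    have hoc : openB plan (Cp plan) (idxP plan c) = true := by
      rw [openB_iff hcn, cellP_idxP hcopen.2.1]; exact hcopen
    have hcand : idxP plan c ∈ candB (Rp plan) (Cp plan) (idxP plan b) := by
      apply candB_of_nbr hbn hcopen.1 hcopen.2.1
      rw [hcellb]; exact hbc.2.2
    have hstep : l.getD (idxP plan b) 0 ≤ l.getD (idxP plan c) 0 := by
      have := hf (idxP plan b) hbn
      rw [newLabelB_open hob] at this
      rw [← this]
      exact (foldMin_spec _ _ _ _).2.1 _ hcand hoc
    exact ⟨le_trans hle hstep, Or.inl hcopen⟩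

lemma fix_label_eq_cmin {plan : List String} {l : List Nat} (hg : GoodB plan l) (hf : FixB plan l)
    {i : Nat} (hi : i < Np plan) (hopen : openB plan (Cp plan) i = true) :
    l.getD i 0 = cmin plan (cellP plan i) := by
  apply le_antisymm
  · obtain ⟨q, hq, hidx⟩ := cmin_mem (plan := plan) (cellP plan i)
    rw [← hidx]
    exact fix_label_le_reach hg hf hi hq
  · obtain ⟨q, hq, hidx⟩ := (hg.2 i hi).2 hopen
    rw [← hidx]
    exact cmin_le hq

-- the set-building fold
lemma mem_set_fold {plan : List String} (l : List Nat) :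
    ∀ (xs : List Nat) (s : PySem.Set Nat) (x : Nat),
      (x ∈ xs.foldl (fun (s : PySem.Set Nat) i =>
          if chA plan (i / Cp plan) (i % Cp plan) == '*' then PySem.Set.add s (l.getD i 0) else s) s) ↔
      (x ∈ s ∨ ∃ i ∈ xs, chA plan (i / Cp plan) (i % Cp plan) = '*' ∧ l.getD i 0 = x) := by
  intro xs
  induction xs with
  | nil => intro s x; simp
  | cons j rest ih =>
    intro s x
    simp only [List.foldl_cons]
    by_cases hj : chA plan (j / Cp plan) (j % Cp plan) = '*'
    · rw [if_pos (by simpa using hj)]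
      rw [ih]
      simp only [PySem.Set.mem_add, List.mem_cons]
      constructor
      · rintro ((h | rfl) | ⟨i, hi, h1, h2⟩)
        · exact Or.inl h
        · exact Or.inr ⟨j, Or.inl rfl, hj, rfl⟩
        · exact Or.inr ⟨i, Or.inr hi, h1, h2⟩
      · rintro (h | ⟨i, hi | hi, h1, h2⟩)
        · exact Or.inl (Or.inl h)
        · subst hi; exact Or.inl (Or.inr h2.symm)
        · exact Or.inr ⟨i, hi, h1, h2⟩
    · rw [if_neg (by simpa using hj)]
      rw [ih]
      simp only [List.mem_cons]
      constructor
      · rintro (h | ⟨i, hi, h1, h2⟩)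
        · exact Or.inl h
        · exact Or.inr ⟨i, Or.inr hi, h1, h2⟩
      · rintro (h | ⟨i, rfl | hi, h1, h2⟩)
        · exact Or.inl h
        · exact absurd h1 hj
        · exact Or.inr ⟨i, hi, h1, h2⟩

lemma nodup_set_fold {plan : List String} (l : List Nat) :
    ∀ (xs : List Nat) (s : PySem.Set Nat), s.Nodup →
      (xs.foldl (fun (s : PySem.Set Nat) i =>
        if chA plan (i / Cp plan) (i % Cp plan) == '*' then PySem.Set.add s (l.getD i 0) else s) s).Nodup := by
  intro xs
  induction xs with
  | nil => intro s hs; simpa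
  | cons j rest ih =>
    intro s hs
    simp only [List.foldl_cons]
    split_ifs with h
    · exact ih _ (PySem.Set.nodup_add _ _ hs)
    · exact ih _ hs


-- ===== A-side proof =====
def visMem (vis : List (List Bool)) (p : Nat × Nat) : Prop := vget vis p.1 p.2 = true
def VShape (plan : List String) (vis : List (List Bool)) : Prop :=
  vis.length = Rp plan ∧ ∀ i, i < Rp plan → (vis.getD i []).length = Cp plan
def visFin (plan : List String) (vis : List (List Bool)) : Finset (Nat × Nat) :=
  (gridF plan).filter (fun p => vget vis p.1 p.2 = true)

lemma getD_row_default {vis : List (List Bool)} {r : Nat} (h : vis.length ≤ r) :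
    vis.getD r [] = [] := by
  rw [List.getD_eq_getElem?_getD, List.getElem?_eq_none (by omega)]
  rfl

lemma getD_row_get {vis : List (List Bool)} {r : Nat} (h : r < vis.length) :
    vis.getD r [] = vis[r] := List.getD_eq_getElem vis [] h

lemma vget_init (plan : List String) (r c : Nat) :
    vget (List.replicate (Rp plan) (List.replicate (Cp plan) false)) r c = false := by
  unfold vget
  by_cases hr : r < Rp plan
  · rw [getD_row_get (by simpa using hr)]
    simp only [List.getElem_replicate]
    by_cases hc : c < Cp plan
    · rw [List.getD_replicate _ hc]
    · rw [List.getD_eq_getElem?_getD, List.getElem?_eq_none (by simpa using hc)]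
      rfl
  · rw [getD_row_default (by simpa using hr)]
    rfl

lemma vshape_init (plan : List String) :
    VShape plan (List.replicate (Rp plan) (List.replicate (Cp plan) false)) := by
  refine ⟨by simp, ?_⟩
  intro i hi
  rw [getD_row_get (by simpa using hi)]
  simp

lemma getD_set_bool (row : List Bool) (c c' : Nat) (hc : c < row.length) :
    (row.set c true).getD c' false = if c = c' then true else row.getD c' false := by
  rw [List.getD_eq_getElem?_getD, List.getD_eq_getElem?_getD, List.getElem?_set]
  by_cases h : c = c'
  · subst h; simp [hc]
  · simp [h]

lemma vget_vset {plan : List String} {vis : List (List Bool)} (hs : VShape plan vis)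
    {r c : Nat} (hr : r < Rp plan) (hc : c < Cp plan) (r' c' : Nat) :
    vget (vset vis r c) r' c' = if r = r' ∧ c = c' then true else vget vis r' c' := by
  unfold vget vset
  have hrlen : r < vis.length := by rw [hs.1]; exact hr
  by_cases h : r = r'
  · subst h
    rw [getD_row_get (by simpa using hrlen), List.getElem_set_self]
    rw [getD_set_bool _ _ _ (by rw [hs.2 r hr]; exact hc)]
    by_cases h2 : c = c' <;> simp [h2]
  · have heq : (vis.set r ((vis.getD r []).set c true)).getD r' [] = vis.getD r' [] := by
      by_cases hr' : r' < vis.length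
      · rw [getD_row_get (by simpa using hr'), getD_row_get hr']
        exact List.getElem_set_ne h _
      · rw [getD_row_default (by simpa using hr'), getD_row_default (by omega)]
    rw [heq]
    simp [h]

lemma vshape_vset {plan : List String} {vis : List (List Bool)} (hs : VShape plan vis)
    (r c : Nat) : VShape plan (vset vis r c) := by
  refine ⟨by simp [vset, hs.1], ?_⟩
  intro i hi
  unfold vset
  by_cases h : i = r
  · subst h
    have hlen : i < vis.length := by rw [hs.1]; exact hi
    rw [getD_row_get (by simpa using hlen), List.getElem_set_self]
    rw [List.length_set]
    exact hs.2 i hi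
  · have heq : (vis.set r ((vis.getD r []).set c true)).getD i [] = vis.getD i [] := by
      by_cases hi' : i < vis.length
      · rw [getD_row_get (by simpa using hi'), getD_row_get hi']
        exact List.getElem_set_ne (by omega) _
      · rw [getD_row_default (by simpa using hi'), getD_row_default (by omega)]
    rw [heq]
    exact hs.2 i hi

lemma card_gridF (plan : List String) : (gridF plan).card = Np plan := by
  unfold gridF Np Rp Cp
  simp [Finset.card_product]

lemma visFin_subset (plan : List String) (vis : List (List Bool)) :
    visFin plan vis ⊆ gridF plan := Finset.filter_subset _ _

lemma visFin_mono {plan : List String} {vis vis' : List (List Bool)}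
    (h : ∀ p, visMem vis p → visMem vis' p) :
    visFin plan vis ⊆ visFin plan vis' := by
  intro p hp
  rw [visFin, Finset.mem_filter] at hp ⊢
  exact ⟨hp.1, h p hp.2⟩

lemma unvis_pos {plan : List String} {vis : List (List Bool)} {r c : Nat}
    (hopen : OpenP plan (r, c)) (hun : vget vis r c = false) :
    (visFin plan vis).card < Np plan := by
  rw [← card_gridF plan]
  apply Finset.card_lt_card
  constructor
  · exact visFin_subset plan vis
  · intro hsub
    have : (r, c) ∈ visFin plan vis := hsub (by rw [mem_gridF]; exact ⟨hopen.1, hopen.2.1⟩)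
    rw [visFin, Finset.mem_filter] at this
    rw [hun] at this
    simp at this

lemma visFin_vset {plan : List String} {vis : List (List Bool)} (hs : VShape plan vis)
    {r c : Nat} (hr : r < Rp plan) (hc : c < Cp plan) :
    visFin plan (vset vis r c) = insert (r, c) (visFin plan vis) := by
  ext p
  simp only [visFin, Finset.mem_filter, Finset.mem_insert]
  rw [vget_vset hs hr hc]
  constructor
  · rintro ⟨hg, hv⟩
    by_cases h : r = p.1 ∧ c = p.2
    · left; exact Prod.ext h.1.symm h.2.symm
    · right; rw [if_neg h] at hv; exact ⟨hg, hv⟩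
  · rintro (rfl | ⟨hg, hv⟩)
    · exact ⟨by rw [mem_gridF]; exact ⟨hr, hc⟩, by simp⟩
    · refine ⟨hg, ?_⟩
      split_ifs with h
      · rfl
      · exact hv


def dirs4 : List (Int × Int) := [(0,1),(1,0),(0,-1),(-1,0)]

lemma visMem_vset {plan : List String} {vis : List (List Bool)} (hs : VShape plan vis)
    {r c : Nat} (hr : r < Rp plan) (hc : c < Cp plan) (p : Nat × Nat) :
    visMem (vset vis r c) p ↔ p = (r, c) ∨ visMem vis p := by
  unfold visMem
  rw [vget_vset hs hr hc]
  constructor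
  · intro h
    by_cases hx : r = p.1 ∧ c = p.2
    · left; exact Prod.ext hx.1.symm hx.2.symm
    · right; rwa [if_neg hx] at h
  · rintro (rfl | h)
    · simp
    · split_ifs with hx
      · rfl
      · exact h

lemma nbrG_of_dir {r c : Nat} {dd : Int × Int} (hdd : dd ∈ dirs4) {nr nc : Int}
    (h1 : nr = (r : Int) + dd.1) (h2 : nc = (c : Int) + dd.2) (h3 : 0 ≤ nr) (h4 : 0 ≤ nc) :
    NbrG (r, c) (nr.toNat, nc.toNat) := by
  have e1 : (nr.toNat : Int) = nr := Int.toNat_of_nonneg h3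
  have e2 : (nc.toNat : Int) = nc := Int.toNat_of_nonneg h4
  unfold NbrG
  dsimp only
  simp only [dirs4, List.mem_cons, List.not_mem_nil, or_false] at hdd
  rcases hdd with h | h | h | h <;> rw [h] at h1 h2 <;> dsimp only at h1 h2
  · left
    exact ⟨by omega, Or.inl (by omega)⟩
  · right
    exact ⟨by omega, Or.inl (by omega)⟩
  · left
    exact ⟨by omega, Or.inr (by omega)⟩
  · right
    exact ⟨by omega, Or.inr (by omega)⟩

lemma dir_of_nbrG {r c : Nat} {q : Nat × Nat} (h : NbrG (r, c) q) :
    ∃ dd ∈ dirs4, ((q.1 : Int) = (r : Int) + dd.1 ∧ (q.2 : Int) = (c : Int) + dd.2) := by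
  unfold NbrG at h
  dsimp only at h
  rcases h with ⟨h1, h2 | h2⟩ | ⟨h1, h2 | h2⟩
  · exact ⟨(0, 1), by simp [dirs4], by constructor <;> omega⟩
  · exact ⟨(0, -1), by simp [dirs4], by constructor <;> omega⟩
  · exact ⟨(1, 0), by simp [dirs4], by constructor <;> omega⟩
  · exact ⟨(-1, 0), by simp [dirs4], by constructor <;> omega⟩

def DfsPost (plan : List String) (vis vis' : List (List Bool)) (d d' : Bool) (r c : Nat) : Prop :=
  VShape plan vis' ∧
  (∀ p, visMem vis p → visMem vis' p) ∧
  visMem vis' (r, c) ∧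
  (∀ p, visMem vis' p → visMem vis p ∨ (OpenP plan p ∧ ReachP plan (r, c) p)) ∧
  (∀ p, visMem vis' p → visMem vis p ∨ ∀ q, AdjP plan p q → visMem vis' q) ∧
  (d' = true ↔ d = true ∨ ∃ p, ¬ visMem vis p ∧ visMem vis' p ∧ chA plan p.1 p.2 = '*')

def GoPost (plan : List String) (st st' : List (List Bool) × Bool) (r c : Nat)
    (dirs : List (Int × Int)) : Prop :=
  VShape plan st'.1 ∧
  (∀ p, visMem st.1 p → visMem st'.1 p) ∧
  (∀ p, visMem st'.1 p → visMem st.1 p ∨ (OpenP plan p ∧ ReachP plan (r, c) p)) ∧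
  (∀ p, visMem st'.1 p → visMem st.1 p ∨ ∀ q, AdjP plan p q → visMem st'.1 q) ∧
  (st'.2 = true ↔ st.2 = true ∨ ∃ p, ¬ visMem st.1 p ∧ visMem st'.1 p ∧ chA plan p.1 p.2 = '*') ∧
  (∀ dd ∈ dirs, ∀ p : Nat × Nat, OpenP plan p →
    ((p.1 : Int) = (r : Int) + dd.1 ∧ (p.2 : Int) = (c : Int) + dd.2) → visMem st'.1 p)

def DfsStmt (plan : List String) (fuel : Nat) : Prop :=
  ∀ (vis : List (List Bool)) (d : Bool) (r c : Nat),
    VShape plan vis → OpenP plan (r, c) → vget vis r c = false →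
    Np plan - (visFin plan vis).card ≤ fuel →
    DfsPost plan vis (dfsA plan (Rp plan) (Cp plan) fuel vis d (r : Int) (c : Int)).1 d
      (dfsA plan (Rp plan) (Cp plan) fuel vis d (r : Int) (c : Int)).2 r c

lemma dfsGo_spec {plan : List String} (fuel : Nat) (hA : DfsStmt plan fuel) :
    ∀ (dirs : List (Int × Int)), (∀ dd ∈ dirs, dd ∈ dirs4) →
    ∀ (st : List (List Bool) × Bool) (r c : Nat),
      VShape plan st.1 → OpenP plan (r, c) → Np plan - (visFin plan st.1).card ≤ fuel →
      GoPost plan st (dfsGo plan (Rp plan) (Cp plan) fuel dirs st (r : Int) (c : Int)) r c dirs := by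
  intro dirs
  induction dirs with
  | nil =>
    intro _ st r c hs hopen hfuel
    rw [dfsGo]
    refine ⟨hs, fun p hp => hp, fun p hp => Or.inl hp, fun p hp => Or.inl hp, ?_, by simp⟩
    constructor
    · intro h; exact Or.inl h
    · rintro (h | ⟨p, h1, h2, _⟩)
      · exact h
      · exact absurd h2 h1
  | cons dd rest ih =>
    intro hsub st r c hs hopen hfuel
    have hddmem : dd ∈ dirs4 := hsub dd List.mem_cons_self
    have hrest : ∀ dd' ∈ rest, dd' ∈ dirs4 := fun dd' h => hsub dd' (List.mem_cons_of_mem _ h)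
    rw [dfsGo]
    set nr := (r : Int) + dd.1 with hnr
    set nc := (c : Int) + dd.2 with hnc
    by_cases hg : 0 ≤ nr ∧ nr < ((Rp plan) : Int) ∧ 0 ≤ nc ∧ nc < ((Cp plan) : Int) ∧
        vget st.1 nr.toNat nc.toNat = false ∧ chA plan nr.toNat nc.toNat ≠ '#'
    · rw [if_pos hg]
      obtain ⟨hg1, hg2, hg3, hg4, hg5, hg6⟩ := hg
      have e1 : ((nr.toNat : Nat) : Int) = nr := Int.toNat_of_nonneg hg1
      have e2 : ((nc.toNat : Nat) : Int) = nc := Int.toNat_of_nonneg hg3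
      have hopen' : OpenP plan (nr.toNat, nc.toNat) := ⟨by omega, by omega, hg6⟩
      have hP := hA st.1 st.2 nr.toNat nc.toNat hs hopen' hg5 hfuel
      rw [e1, e2] at hP
      obtain ⟨P1, P2, P3, P4, P5, P6⟩ := hP
      set st' := dfsA plan (Rp plan) (Cp plan) fuel st.1 st.2 nr nc with hst'
      have hsubcard : (visFin plan st.1).card ≤ (visFin plan st'.1).card :=
        Finset.card_le_card (visFin_mono P2)
      have hcard_le : (visFin plan st'.1).card ≤ Np plan := by
        rw [← card_gridF plan]; exact Finset.card_le_card (visFin_subset plan st'.1)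
      have hQ := ih hrest st' r c P1 hopen (by omega)
      obtain ⟨Q1, Q2, Q4, Q5, Q6, Qd⟩ := hQ
      have hadj : AdjP plan (r, c) (nr.toNat, nc.toNat) :=
        ⟨hopen, hopen', nbrG_of_dir hddmem hnr hnc hg1 hg3⟩
      refine ⟨Q1, fun p hp => Q2 p (P2 p hp), ?_, ?_, ?_, ?_⟩
      · -- reachability of new cells
        intro p hp
        rcases Q4 p hp with hp' | ⟨ho, hr'⟩
        · rcases P4 p hp' with hp'' | ⟨ho, hr''⟩
          · exact Or.inl hp''
          · exact Or.inr ⟨ho, Relation.ReflTransGen.head hadj hr''⟩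
        · exact Or.inr ⟨ho, hr'⟩
      · -- closure of new cells
        intro p hp
        rcases Q5 p hp with hp' | hcl
        · rcases P5 p hp' with hp'' | hcl
          · exact Or.inl hp''
          · exact Or.inr (fun q hq => Q2 q (hcl q hq))
        · exact Or.inr hcl
      · -- dirty flag
        constructor
        · intro h
          rcases Q6.mp h with h' | ⟨p, h1, h2, h3⟩
          · rcases P6.mp h' with h'' | ⟨p, h1, h2, h3⟩
            · exact Or.inl h''
            · exact Or.inr ⟨p, h1, Q2 p h2, h3⟩
          · exact Or.inr ⟨p, fun hv => h1 (P2 p hv), h2, h3⟩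
        · rintro (h | ⟨p, h1, h2, h3⟩)
          · exact Q6.mpr (Or.inl (P6.mpr (Or.inl h)))
          · by_cases hmid : visMem st'.1 p
            · exact Q6.mpr (Or.inl (P6.mpr (Or.inr ⟨p, h1, hmid, h3⟩)))
            · exact Q6.mpr (Or.inr ⟨p, hmid, h2, h3⟩)
      · -- all directions handled
        intro dd' hdd' p hpo hpc
        rcases List.mem_cons.mp hdd' with rfl | hdd'r
        · have hp_eq : p = (nr.toNat, nc.toNat) := by
            have : (p.1 : Int) = nr := hpc.1
            have : (p.2 : Int) = nc := hpc.2
            ext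
            · dsimp only; omega
            · dsimp only; omega
          rw [hp_eq]
          exact Q2 _ P3
        · exact Qd dd' hdd'r p hpo hpc
    · rw [if_neg hg]
      have hQ := ih hrest st r c hs hopen hfuel
      obtain ⟨Q1, Q2, Q4, Q5, Q6, Qd⟩ := hQ
      refine ⟨Q1, Q2, Q4, Q5, Q6, ?_⟩
      intro dd' hdd' p hpo hpc
      rcases List.mem_cons.mp hdd' with rfl | hdd'r
      · -- the guard failed, but all its parts except "unvisited" hold for the open cell p
        have e1 : nr = (p.1 : Int) := hpc.1.symm
        have e2 : nc = (p.2 : Int) := hpc.2.symm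
        have hvg : vget st.1 nr.toNat nc.toNat = true := by
          by_contra hv
          apply hg
          refine ⟨by omega, by rw [e1]; exact_mod_cast hpo.1, by omega, by rw [e2]; exact_mod_cast hpo.2.1, by simpa using hv, ?_⟩
          rw [e1, e2]
          simpa using hpo.2.2
        have : visMem st.1 p := by
          have : nr.toNat = p.1 := by omega
          have h2 : nc.toNat = p.2 := by omega
          unfold visMem
          rw [← this, ← h2]
          exact hvg
        exact Q2 p this
      · exact Qd dd' hdd'r p hpo hpc

lemma dfsA_spec {plan : List String} : ∀ (fuel : Nat), DfsStmt plan fuel := by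
  intro fuel
  induction fuel with
  | zero =>
    intro vis d r c hs hopen hun hfuel
    exfalso
    have := unvis_pos hopen hun
    omega
  | succ f ih =>
    intro vis d r c hs hopen hun hfuel
    rw [dfsA]
    simp only [Int.toNat_natCast]
    set d1 := d || (chA plan r c == '*') with hd1
    set vis1 := vset vis r c with hvis1
    have hs1 : VShape plan vis1 := vshape_vset hs r c
    have hmem1 : ∀ p, visMem vis1 p ↔ p = (r, c) ∨ visMem vis p :=
      visMem_vset hs hopen.1 hopen.2.1
    have hfin1 : visFin plan vis1 = insert (r, c) (visFin plan vis) :=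
      visFin_vset hs hopen.1 hopen.2.1
    have hnotmem : (r, c) ∉ visFin plan vis := by
      intro hmem
      rw [visFin, Finset.mem_filter] at hmem
      rw [hun] at hmem
      simp at hmem
    have hcard1 : (visFin plan vis1).card = (visFin plan vis).card + 1 := by
      rw [hfin1, Finset.card_insert_of_notMem hnotmem]
    have hcard_le : (visFin plan vis1).card ≤ Np plan := by
      rw [← card_gridF plan]; exact Finset.card_le_card (visFin_subset plan vis1)
    have hG := dfsGo_spec f ih dirs4 (fun dd h => h) (vis1, d1) r c hs1 hopen
      (by show Np plan - (visFin plan vis1).card ≤ f; omega)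
    obtain ⟨G1, G2, G4, G5, G6, Gd⟩ := hG
    set res := dfsGo plan (Rp plan) (Cp plan) f dirs4 (vis1, d1) (r : Int) (c : Int) with hres
    have hsub1 : ∀ p, visMem vis p → visMem vis1 p := fun p hp => (hmem1 p).mpr (Or.inr hp)
    have hrc1 : visMem vis1 (r, c) := (hmem1 (r, c)).mpr (Or.inl rfl)
    refine ⟨G1, fun p hp => G2 p (hsub1 p hp), G2 _ hrc1, ?_, ?_, ?_⟩
    · intro p hp
      rcases G4 p hp with hp' | ⟨ho, hr'⟩
      · rcases (hmem1 p).mp hp' with rfl | hp''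
        · exact Or.inr ⟨hopen, Relation.ReflTransGen.refl⟩
        · exact Or.inl hp''
      · exact Or.inr ⟨ho, hr'⟩
    · intro p hp
      rcases G5 p hp with hp' | hcl
      · rcases (hmem1 p).mp hp' with rfl | hp''
        · right
          intro q hq
          obtain ⟨dd, hdd, hq1, hq2⟩ := dir_of_nbrG hq.2.2
          exact Gd dd hdd q hq.2.1 ⟨hq1, hq2⟩
        · exact Or.inl hp''
      · exact Or.inr hcl
    · constructor
      · intro h
        rcases G6.mp h with h' | ⟨p, h1, h2, h3⟩
        · rw [hd1] at h'
          rcases Bool.or_eq_true_iff.mp h' with hd | hc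
          · exact Or.inl hd
          · refine Or.inr ⟨(r, c), by simpa [visMem] using hun, G2 _ hrc1, ?_⟩
            simpa using hc
        · refine Or.inr ⟨p, ?_, h2, h3⟩
          intro hv
          exact h1 (hsub1 p hv)
      · rintro (h | ⟨p, h1, h2, h3⟩)
        · exact G6.mpr (Or.inl (by rw [hd1, h]; simp))
        · by_cases hmid : visMem vis1 p
          · rcases (hmem1 p).mp hmid with rfl | hp''
            · apply G6.mpr
              apply Or.inl
              rw [hd1]
              have : chA plan r c == '*' := by
                dsimp only at h3
                rw [h3]
                decide
              rw [this]
              simp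
            · exact absurd hp'' h1
          · exact G6.mpr (Or.inr ⟨p, hmid, h2, h3⟩)


noncomputable def touchedF (plan : List String) (P : Finset (Nat × Nat)) : Finset (Nat × Nat) :=
  letI := Classical.decPred (fun q : Nat × Nat =>
    chA plan q.1 q.2 = '*' ∧ ∃ s ∈ P, EligP plan s ∧ ReachP plan s q)
  (gridF plan).filter (fun q => chA plan q.1 q.2 = '*' ∧ ∃ s ∈ P, EligP plan s ∧ ReachP plan s q)

def InvA (plan : List String) (P : Finset (Nat × Nat)) (st : List (List Bool) × Int) : Prop :=
  VShape plan st.1 ∧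
  (∀ p, visMem st.1 p ↔ ∃ s ∈ P, EligP plan s ∧ ReachP plan s p) ∧
  st.2 = (((touchedF plan P).image (cmin plan)).card : Int)

def stepA (plan : List String) (x : Nat × Nat) (st : List (List Bool) × Int) :
    List (List Bool) × Int :=
  if (chA plan x.1 x.2 == '.' || chA plan x.1 x.2 == '*') && vget st.1 x.1 x.2 == false then
    ((dfsA plan (Rp plan) (Cp plan) (Rp plan * Cp plan + 1) st.1 false (x.1 : Int) (x.2 : Int)).1,
     if (dfsA plan (Rp plan) (Cp plan) (Rp plan * Cp plan + 1) st.1 false (x.1 : Int) (x.2 : Int)).2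
     then st.2 + 1 else st.2)
  else st

lemma eligP_open {plan : List String} {p : Nat × Nat} (h : EligP plan p) : OpenP plan p := by
  refine ⟨h.1, h.2.1, ?_⟩
  rcases h.2.2 with h' | h' <;> rw [h'] <;> decide

lemma mem_touchedF {plan : List String} {P : Finset (Nat × Nat)} {q : Nat × Nat} :
    q ∈ touchedF plan P ↔ q ∈ gridF plan ∧ chA plan q.1 q.2 = '*' ∧
      ∃ s ∈ P, EligP plan s ∧ ReachP plan s q := by
  unfold touchedF
  exact @Finset.mem_filter _ _ (Classical.decPred _) _ _

lemma stepA_inv {plan : List String} {P : Finset (Nat × Nat)} {st : List (List Bool) × Int}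
    {x : Nat × Nat} (hx : x ∈ gridF plan) (hinv : InvA plan P st) :
    InvA plan (insert x P) (stepA plan x st) := by
  obtain ⟨hsh, hvis, hcnt⟩ := hinv
  have hclosed : ∀ p q, visMem st.1 p → AdjP plan p q → visMem st.1 q := by
    intro p q hp hadj
    obtain ⟨s, hsP, hse, hsr⟩ := (hvis p).mp hp
    exact (hvis q).mpr ⟨s, hsP, hse, Relation.ReflTransGen.tail hsr hadj⟩
  have hxb := mem_gridF.mp hx
  unfold stepA
  by_cases hchar : chA plan x.1 x.2 = '.' ∨ chA plan x.1 x.2 = '*'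
  · have hE : EligP plan x := ⟨hxb.1, hxb.2, hchar⟩
    by_cases hvg : vget st.1 x.1 x.2 = false
    · -- new component: run dfs
      rw [if_pos (by
        rcases hchar with h | h <;> simp [h, hvg])]
      have hfuel : Np plan - (visFin plan st.1).card ≤ Rp plan * Cp plan + 1 := by
        have : Np plan = Rp plan * Cp plan := rfl
        omega
      have hD := dfsA_spec (Rp plan * Cp plan + 1) st.1 false x.1 x.2 hsh (eligP_open hE) hvg hfuel
      obtain ⟨D1, D2, D3, D4, D5, D6⟩ := hD
      set res := dfsA plan (Rp plan) (Cp plan) (Rp plan * Cp plan + 1) st.1 false (x.1 : Int) (x.2 : Int) with hres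
      have hxpair : ((x.1 : Nat), (x.2 : Nat)) = x := rfl
      rw [hxpair] at D3 D4
      have hreach_mem : ∀ p, ReachP plan x p → visMem res.1 p := by
        intro p hp
        induction hp with
        | refl => exact D3
        | tail hab hbc ihb =>
          rcases D5 _ ihb with hb | hcl
          · exact D2 _ (hclosed _ _ hb hbc)
          · exact hcl _ hbc
      have hdisj : ∀ p, ReachP plan x p → ¬ visMem st.1 p := by
        intro p hp hmem
        obtain ⟨s, hsP, hse, hsr⟩ := (hvis p).mp hmem
        have : visMem st.1 x := (hvis x).mpr ⟨s, hsP, hse, Relation.ReflTransGen.trans hsr (reachP_symm hp)⟩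
        unfold visMem at this
        rw [hvg] at this
        exact Bool.false_ne_true this
      have hvis' : ∀ p, visMem res.1 p ↔ visMem st.1 p ∨ ReachP plan x p := by
        intro p
        constructor
        · intro hp
          rcases D4 p hp with h | ⟨_, h⟩
          · exact Or.inl h
          · exact Or.inr h
        · rintro (h | h)
          · exact D2 _ h
          · exact hreach_mem _ h
      have hflag : res.2 = true ↔ ∃ p, ReachP plan x p ∧ chA plan p.1 p.2 = '*' := by
        rw [D6]
        constructor
        · rintro (h | ⟨p, h1, h2, h3⟩)
          · exact absurd h Bool.false_ne_true
          · rcases (hvis' p).mp h2 with h | h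
            · exact absurd h h1
            · exact ⟨p, h, h3⟩
        · rintro ⟨p, h1, h2⟩
          exact Or.inr ⟨p, hdisj p h1, hreach_mem p h1, h2⟩
      have hvis'' : ∀ p, visMem res.1 p ↔ ∃ s ∈ insert x P, EligP plan s ∧ ReachP plan s p := by
        intro p
        rw [hvis']
        constructor
        · rintro (h | h)
          · obtain ⟨s, hsP, hse, hsr⟩ := (hvis p).mp h
            exact ⟨s, Finset.mem_insert_of_mem hsP, hse, hsr⟩
          · exact ⟨x, Finset.mem_insert_self x P, hE, h⟩
        · rintro ⟨s, hsP, hse, hsr⟩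
          rcases Finset.mem_insert.mp hsP with rfl | hsP'
          · exact Or.inr hsr
          · exact Or.inl ((hvis p).mpr ⟨s, hsP', hse, hsr⟩)
      refine ⟨D1, hvis'', ?_⟩
      by_cases hfl : res.2 = true
      · rw [if_pos hfl]
        obtain ⟨p0, hp0r, hp0d⟩ := hflag.mp hfl
        have hp0open : OpenP plan p0 := reachP_open (eligP_open hE) hp0r
        have himage : (touchedF plan (insert x P)).image (cmin plan)
            = insert (cmin plan x) ((touchedF plan P).image (cmin plan)) := by
          ext y
          simp only [Finset.mem_image, Finset.mem_insert]
          constructor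
          · rintro ⟨q, hq, rfl⟩
            rw [mem_touchedF] at hq
            obtain ⟨hqg, hqd, s, hsP, hse, hsr⟩ := hq
            rcases Finset.mem_insert.mp hsP with rfl | hsP'
            · left
              exact (cmin_eq_of_reach hsr).symm
            · right
              exact ⟨q, mem_touchedF.mpr ⟨hqg, hqd, s, hsP', hse, hsr⟩, rfl⟩
          · rintro (rfl | ⟨q, hq, rfl⟩)
            · refine ⟨p0, mem_touchedF.mpr ⟨mem_gridF.mpr ⟨hp0open.1, hp0open.2.1⟩, hp0d,
                x, Finset.mem_insert_self x P, hE, hp0r⟩, ?_⟩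
              exact (cmin_eq_of_reach hp0r).symm
            · rw [mem_touchedF] at hq
              obtain ⟨hqg, hqd, s, hsP, hse, hsr⟩ := hq
              exact ⟨q, mem_touchedF.mpr ⟨hqg, hqd, s, Finset.mem_insert_of_mem hsP, hse, hsr⟩, rfl⟩
        have hnotmem : cmin plan x ∉ (touchedF plan P).image (cmin plan) := by
          rintro hmem
          obtain ⟨q, hq, hqc⟩ := Finset.mem_image.mp hmem
          rw [mem_touchedF] at hq
          obtain ⟨hqg, hqd, s, hsP, hse, hsr⟩ := hq
          have hqopen : OpenP plan q := ⟨(mem_gridF.mp hqg).1, (mem_gridF.mp hqg).2, by rw [hqd]; decide⟩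
          have : ReachP plan q x := cmin_inj hqopen (eligP_open hE) hqc
          have : visMem st.1 x := (hvis x).mpr ⟨s, hsP, hse, Relation.ReflTransGen.trans hsr this⟩
          unfold visMem at this
          rw [hvg] at this
          exact Bool.false_ne_true this
        rw [himage, Finset.card_insert_of_notMem hnotmem, hcnt]
        push_cast
        ring
      · rw [if_neg hfl]
        have himage : touchedF plan (insert x P) = touchedF plan P := by
          ext q
          rw [mem_touchedF, mem_touchedF]
          constructor
          · rintro ⟨hqg, hqd, s, hsP, hse, hsr⟩
            rcases Finset.mem_insert.mp hsP with rfl | hsP'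
            · exact absurd (hflag.mpr ⟨q, hsr, hqd⟩) hfl
            · exact ⟨hqg, hqd, s, hsP', hse, hsr⟩
          · rintro ⟨hqg, hqd, s, hsP, hse, hsr⟩
            exact ⟨hqg, hqd, s, Finset.mem_insert_of_mem hsP, hse, hsr⟩
        rw [himage]
        exact hcnt
    · -- already visited
      rw [if_neg (by
        simp only [Bool.and_eq_true, beq_iff_eq]
        rintro ⟨-, h2⟩
        exact hvg h2)]
      simp only [Bool.not_eq_false] at hvg
      obtain ⟨s0, hs0P, hs0e, hs0r⟩ := (hvis x).mp hvg
      have hequiv : ∀ p, (∃ s ∈ insert x P, EligP plan s ∧ ReachP plan s p) ↔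
          ∃ s ∈ P, EligP plan s ∧ ReachP plan s p := by
        intro p
        constructor
        · rintro ⟨s, hsP, hse, hsr⟩
          rcases Finset.mem_insert.mp hsP with rfl | hsP'
          · exact ⟨s0, hs0P, hs0e, Relation.ReflTransGen.trans hs0r hsr⟩
          · exact ⟨s, hsP', hse, hsr⟩
        · rintro ⟨s, hsP, hse, hsr⟩
          exact ⟨s, Finset.mem_insert_of_mem hsP, hse, hsr⟩
      refine ⟨hsh, ?_, ?_⟩
      · intro p
        rw [hvis p, hequiv p]
      · have : touchedF plan (insert x P) = touchedF plan P := by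
          ext q
          rw [mem_touchedF, mem_touchedF]
          constructor
          · rintro ⟨hqg, hqd, hex⟩
            exact ⟨hqg, hqd, (hequiv q).mp hex⟩
          · rintro ⟨hqg, hqd, hex⟩
            exact ⟨hqg, hqd, (hequiv q).mpr hex⟩
        rw [this]
        exact hcnt
  · -- not an eligible starting character
    rw [if_neg (by
      simp only [Bool.and_eq_true, Bool.or_eq_true, beq_iff_eq]
      rintro ⟨h1 | h1, -⟩ <;> exact hchar (by simp [h1]))]
    have hnE : ¬ EligP plan x := fun hE => hchar hE.2.2
    have hequiv : ∀ p, (∃ s ∈ insert x P, EligP plan s ∧ ReachP plan s p) ↔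
        ∃ s ∈ P, EligP plan s ∧ ReachP plan s p := by
      intro p
      constructor
      · rintro ⟨s, hsP, hse, hsr⟩
        rcases Finset.mem_insert.mp hsP with rfl | hsP'
        · exact absurd hse hnE
        · exact ⟨s, hsP', hse, hsr⟩
      · rintro ⟨s, hsP, hse, hsr⟩
        exact ⟨s, Finset.mem_insert_of_mem hsP, hse, hsr⟩
    refine ⟨hsh, ?_, ?_⟩
    · intro p
      rw [hvis p, hequiv p]
    · have : touchedF plan (insert x P) = touchedF plan P := by
        ext q
        rw [mem_touchedF, mem_touchedF]
        constructor
        · rintro ⟨hqg, hqd, hex⟩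
          exact ⟨hqg, hqd, (hequiv q).mp hex⟩
        · rintro ⟨hqg, hqd, hex⟩
          exact ⟨hqg, hqd, (hequiv q).mpr hex⟩
      rw [this]
      exact hcnt

lemma loopA_inv {plan : List String} :
    ∀ (cells : List (Nat × Nat)) (P : Finset (Nat × Nat)) (st : List (List Bool) × Int),
      (∀ x ∈ cells, x ∈ gridF plan) → InvA plan P st →
      InvA plan (cells.foldl (fun P x => insert x P) P)
        (cells.foldl (fun st x => stepA plan x st) st) := by
  intro cells
  induction cells with
  | nil => intro P st _ h; exact h
  | cons x rest ih =>
    intro P st hmem hinv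
    simp only [List.foldl_cons]
    exact ih (insert x P) (stepA plan x st)
      (fun y hy => hmem y (List.mem_cons_of_mem _ hy))
      (stepA_inv (hmem x List.mem_cons_self) hinv)

lemma mem_foldl_insert {α : Type} [DecidableEq α] :
    ∀ (cells : List α) (P : Finset α) (y : α),
      y ∈ cells.foldl (fun P x => insert x P) P ↔ y ∈ P ∨ y ∈ cells := by
  intro cells
  induction cells with
  | nil => intro P y; simp
  | cons x rest ih =>
    intro P y
    simp only [List.foldl_cons, ih, Finset.mem_insert, List.mem_cons]
    tauto

def cellsL (plan : List String) : List (Nat × Nat) :=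
  (List.range (Rp plan)).flatMap (fun r => (List.range (Cp plan)).map (fun c => (r, c)))

lemma foldl_nested {σ : Type} (g : Nat × Nat → σ → σ) :
    ∀ (rs : List Nat) (cs : List Nat) (init : σ),
      rs.foldl (fun st r => cs.foldl (fun st c => g (r, c) st) st) init
        = (rs.flatMap (fun r => cs.map (fun c => (r, c)))).foldl (fun st x => g x st) init := by
  intro rs
  induction rs with
  | nil => intro cs init; simp
  | cons r rest ih =>
    intro cs init
    simp only [List.foldl_cons, List.flatMap_cons, List.foldl_append, List.foldl_map]
    exact ih cs _

lemma solution_eq_foldl (plan : List String) :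
    solution plan = ((cellsL plan).foldl (fun st x => stepA plan x st)
      (List.replicate (Rp plan) (List.replicate (Cp plan) false), (0 : Int))).2 := by
  unfold cellsL
  rw [← foldl_nested (stepA plan) (List.range (Rp plan)) (List.range (Cp plan))]
  rfl

theorem solution_eq_answer (plan : List String) :
    solution plan = (answerVal plan : Int) := by
  have hinit : InvA plan ∅ (List.replicate (Rp plan) (List.replicate (Cp plan) false), (0 : Int)) := by
    refine ⟨vshape_init plan, ?_, ?_⟩
    · intro p
      unfold visMem
      rw [vget_init]
      simp
    · have : touchedF plan ∅ = ∅ := by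
        ext q
        rw [mem_touchedF]
        simp
      rw [this]
      simp
  have hcells : ∀ x ∈ cellsL plan, x ∈ gridF plan := by
    intro x hx
    unfold cellsL at hx
    rw [List.mem_flatMap] at hx
    obtain ⟨r, hr, hx⟩ := hx
    rw [List.mem_map] at hx
    obtain ⟨c, hc, rfl⟩ := hx
    rw [mem_gridF]
    exact ⟨by simpa using hr, by simpa using hc⟩
  have hfin := loopA_inv (cellsL plan) ∅ _ hcells hinit
  rw [solution_eq_foldl plan, hfin.2.2]
  have htouched : touchedF plan ((cellsL plan).foldl (fun P x => insert x P) ∅)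
      = (gridF plan).filter (fun q => chA plan q.1 q.2 = '*') := by
    ext q
    rw [mem_touchedF, Finset.mem_filter]
    constructor
    · rintro ⟨hqg, hqd, -⟩
      exact ⟨hqg, hqd⟩
    · rintro ⟨hqg, hqd⟩
      refine ⟨hqg, hqd, q, ?_, ⟨(mem_gridF.mp hqg).1, (mem_gridF.mp hqg).2, Or.inr hqd⟩,
        Relation.ReflTransGen.refl⟩
      rw [mem_foldl_insert]
      right
      unfold cellsL
      rw [List.mem_flatMap]
      exact ⟨q.1, by simpa using (mem_gridF.mp hqg).1,
        List.mem_map.mpr ⟨q.2, by simpa using (mem_gridF.mp hqg).2, rfl⟩⟩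
  rw [htouched]
  rfl

theorem solution_alt_eq_answer (plan : List String) :
    solution_alt plan = (answerVal plan : Int) := by
  have hsum : (List.range (Np plan)).sum < Np plan * Np plan + 1 := by
    have h1 := List.sum_le_card_nsmul (List.range (Np plan)) (Np plan)
      (by intro x hx; simp only [List.mem_range] at hx; omega)
    simp only [List.length_range, smul_eq_mul] at h1
    omega
  obtain ⟨hgood, hfix⟩ := iterB_good (Np plan * Np plan + 1) (List.range (Np plan)) (goodB_init plan) hsum
  set l := iterB plan (Rp plan) (Cp plan) (Np plan) (Np plan * Np plan + 1) (List.range (Np plan)) with hl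
  set s := (List.range (Np plan)).foldl (fun (s : PySem.Set Nat) i =>
      if chA plan (i / Cp plan) (i % Cp plan) == '*' then PySem.Set.add s (l.getD i 0) else s)
    PySem.Set.empty with hs
  have hnodup : s.Nodup := nodup_set_fold l (List.range (Np plan)) PySem.Set.empty (by simp [PySem.Set.empty])
  have hmem : ∀ x, x ∈ s ↔ ∃ i, i < Np plan ∧ chA plan (i / Cp plan) (i % Cp plan) = '*' ∧ l.getD i 0 = x := by
    intro x
    rw [hs, mem_set_fold]
    simp [PySem.Set.empty]
  have hset : s.toFinset = ((gridF plan).filter (fun q => chA plan q.1 q.2 = '*')).image (cmin plan) := by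
    ext x
    rw [List.mem_toFinset, hmem]
    simp only [Finset.mem_image, Finset.mem_filter, mem_gridF]
    constructor
    · rintro ⟨i, hi, hdirty, hx⟩
      have hb := cellP_lt hi
      have hopen : openB plan (Cp plan) i = true := by
        rw [openB_iff hi]
        exact ⟨hb.1, hb.2, by unfold cellP; dsimp only; rw [hdirty]; decide⟩
      refine ⟨cellP plan i, ⟨⟨hb.1, hb.2⟩, hdirty⟩, ?_⟩
      rw [← fix_label_eq_cmin hgood hfix hi hopen, hx]
    · rintro ⟨q, ⟨⟨hq1, hq2⟩, hdirty⟩, hx⟩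
      have hin : idxP plan q < Np plan := idxP_lt hq1 hq2
      have hcell : cellP plan (idxP plan q) = q := cellP_idxP hq2
      refine ⟨idxP plan q, hin, ?_, ?_⟩
      · show chA plan (cellP plan (idxP plan q)).1 (cellP plan (idxP plan q)).2 = '*'
        rw [hcell]; exact hdirty
      · have hopen : openB plan (Cp plan) (idxP plan q) = true := by
          rw [openB_iff hin, hcell]
          exact ⟨hq1, hq2, by rw [hdirty]; decide⟩
        rw [fix_label_eq_cmin hgood hfix hin hopen, hcell, hx]
  have hlen : s.length = answerVal plan := by
    rw [← List.toFinset_card_of_nodup hnodup, hset]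
    rfl
  show ((s.length : Nat) : Int) = (answerVal plan : Int)
  exact_mod_cast hlen

-- ===== VERDICT (by name: the statement is the Claim_ definition above) =====
theorem solution_spec : Claim_equal_solution := by
  intro plan _ _
  unfold Spec_solution
  rw [solution_eq_answer plan, solution_alt_eq_answer plan]
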